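-- pv_equiv track=rewrite | github.com/JuanCogollo/fundamentos-de-programacion-2022 | modulo8/ejercicio7.py | julianachi
-- ===== SOURCE A (Python) =====
-- def julianachi(num):
--     serie = [1]
--     # for i in range(num):
--     while serie[-1] <= num:
--         div = 0
--         for k in range(1, serie[-1] + 1):
--             if serie[-1] % k == 0:
--                 div += 1
--         serie.append(serie[-1] + div)
--
--     return serie
-- ===== SOURCE B (Python) =====
-- def julianachi(num):
--     serie = [1]
--     while serie[-1] <= num:
--         n = serie[-1]
--         d = 0
--         k = 1
--         while k * k <= n:
--             if n % k == 0:
--                 d += 1 if k * k == n else 2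
--             k += 1
--         serie.append(n + d)
--     return serie
-- ===== Notes on version B (the rewrite author's own statement) =====
-- stated objective: faster
-- what changed: Each term's divisor count is computed by trial division only up to the square root, counting each small divisor together with its cofactor (the cofactor once when they coincide), instead of testing every candidate up to the term itself.
import Mathlib
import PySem

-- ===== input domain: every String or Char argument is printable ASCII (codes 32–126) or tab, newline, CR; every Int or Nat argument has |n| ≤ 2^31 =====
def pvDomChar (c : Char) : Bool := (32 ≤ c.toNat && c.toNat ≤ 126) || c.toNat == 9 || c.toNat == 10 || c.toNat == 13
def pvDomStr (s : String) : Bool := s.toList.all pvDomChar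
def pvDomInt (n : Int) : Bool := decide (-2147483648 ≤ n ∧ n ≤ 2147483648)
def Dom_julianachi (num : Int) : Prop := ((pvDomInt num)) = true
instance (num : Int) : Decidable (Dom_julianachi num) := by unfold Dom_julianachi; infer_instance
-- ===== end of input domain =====

-- B replaces A's per-term divisor scan over 1..n by trial division up to sqrt(n),
-- counting each small divisor together with its cofactor (objective: faster).

-- ===== PORT A =====
-- divisor count by testing every candidate from one up to the number itself (A's inner for-loop)
def pyDivCountA (n : Int) : Int :=
  (PySem.List.pyRange 1 (n + 1) 1).foldl
    (fun div k => if PySem.Int.mod n k = 0 then div + 1 else div) 0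

-- while serie[-1] <= num: serie.append(serie[-1] + div)   (fuel is only a totality
-- guard: each appended term strictly exceeds the last, so num.toNat steps suffice)
def buildA (fuel : Nat) (num c : Int) : List Int :=
  match fuel with
  | 0 => [c]
  | f + 1 => if c ≤ num then c :: buildA f num (c + pyDivCountA c) else [c]

def julianachi (num : Int) : List Int := buildA num.toNat num 1

-- ===== PORT B =====
-- the inner `while k * k <= n` loop of Source B, accumulating d  (fuel = totality guard)
def sqrtCountLoop (fuel : Nat) (n k d : Int) : Int :=
  match fuel with
  | 0 => d
  | f + 1 =>
    if k * k ≤ n then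
      sqrtCountLoop f n (k + 1)
        (if PySem.Int.mod n k = 0 then (if k * k = n then d + 1 else d + 2) else d)
    else d

def sqrtDivCountB (n : Int) : Int := sqrtCountLoop n.toNat n 1 0

def buildB (fuel : Nat) (num c : Int) : List Int :=
  match fuel with
  | 0 => [c]
  | f + 1 => if c ≤ num then c :: buildB f num (c + sqrtDivCountB c) else [c]

def julianachi_alt (num : Int) : List Int := buildB num.toNat num 1

-- ===== PRECONDITION & SPEC =====
def Spec_julianachi (num : Int) (out : List Int) : Prop := out = julianachi_alt num
instance (num : Int) (out : List Int) : Decidable (Spec_julianachi num out) := by unfold Spec_julianachi; infer_instance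

-- ===== CLAIM (what is proved, stated in full; the proofs are below) =====
def Claim_equal_julianachi : Prop := ∀ (num : Int), Dom_julianachi num → Spec_julianachi num (julianachi num)

-- ===== LEMMAS AND PROOFS =====
theorem pyDivCountA_pos (n : Int) (hn : 1 ≤ n) : 1 ≤ pyDivCountA n := by
  unfold pyDivCountA
  rw [PySem.List.foldl_ite_add_one]
  have : 0 < (PySem.List.pyRange 1 (n + 1) 1).countP (fun k => decide (PySem.Int.mod n k = 0)) := by
    rw [List.countP_pos_iff]
    exact ⟨1, (PySem.List.mem_pyRange_one).2 ⟨le_refl _, by omega⟩, by simp⟩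
  omega

def contribN (n j : ℕ) : ℕ := if j ∣ n then (if j * j = n then 1 else 2) else 0

theorem countA_nat (n : ℕ) (hn : 1 ≤ n) : pyDivCountA (n : ℤ) = ((Nat.divisors n).card : ℤ) := by
  unfold pyDivCountA
  rw [PySem.List.foldl_ite_add_one, zero_add]
  have hr : PySem.List.pyRange 1 ((n : ℤ) + 1) 1
      = (List.range ((((n : ℤ) + 1) - 1).toNat)).map (fun k : ℕ => (1 : ℤ) + k) :=
    PySem.List.pyRange_one 1 _
  have hto : (((n : ℤ) + 1) - 1).toNat = n := by omega
  rw [hto] at hr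
  rw [hr, List.countP_map]
  have hc : ((fun x => decide (PySem.Int.mod (n : ℤ) x = 0)) ∘ (fun k : ℕ => (1 : ℤ) + k))
      = (fun k : ℕ => decide ((1 + k) ∣ n)) := by
    funext k
    simp only [Function.comp_apply, PySem.Int.mod_eq_zero_iff_dvd, decide_eq_decide]
    exact_mod_cast Iff.rfl
  rw [hc]
  congr 1
  have hfin : ((Finset.range n).filter (fun k => (1 + k) ∣ n)).card
      = (List.range n).countP (fun k => decide ((1 + k) ∣ n)) := by
    simp [Finset.card, Finset.filter, Finset.range, Multiset.range, List.countP_eq_length_filter]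
  rw [← hfin]
  refine Finset.card_nbij (fun k => 1 + k) ?_ ?_ ?_
  · intro k hk
    simp only [Finset.coe_filter, Set.mem_setOf_eq, Finset.mem_range] at hk
    simp only [Finset.mem_coe, Nat.mem_divisors]
    exact ⟨hk.2, by omega⟩
  · intro a ha b hb hab
    exact Nat.add_left_cancel hab
  · intro j hj
    simp only [Finset.mem_coe, Nat.mem_divisors] at hj
    obtain ⟨hd, -⟩ := hj
    have h1 : 1 ≤ j := Nat.pos_of_dvd_of_pos hd (by omega)
    have h2 : j ≤ n := Nat.le_of_dvd (by omega) hd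
    refine ⟨j - 1, ?_, by show 1 + (j - 1) = j; omega⟩
    simp only [Finset.coe_filter, Set.mem_setOf_eq, Finset.mem_range]
    exact ⟨by omega, by rw [Nat.add_sub_cancel' h1]; exact hd⟩

theorem sqrtLoop_spec (n : ℕ) (hn : 1 ≤ n) (fuel : Nat) (k d : ℤ) (hk : 1 ≤ k)
    (hfuel : (n : ℤ) + 1 - k ≤ fuel) :
    sqrtCountLoop fuel (n : ℤ) k d
      = d + ((∑ j ∈ Finset.Ico k.toNat (Nat.sqrt n + 1), contribN n j : ℕ) : ℤ) := by
  induction fuel generalizing k d with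
  | zero =>
    have hlt : Nat.sqrt n < k.toNat := by
      rw [Nat.sqrt_lt]
      calc n < k.toNat := by omega
        _ ≤ k.toNat * k.toNat := Nat.le_mul_of_pos_left _ (by omega)
    rw [sqrtCountLoop, Finset.Ico_eq_empty (by omega), Finset.sum_empty]
    simp
  | succ f ih =>
    rw [sqrtCountLoop]
    have hkz : ((k.toNat : ℤ)) = k := by omega
    by_cases h : k * k ≤ (n : ℤ)
    · rw [if_pos h]
      have hkn : k.toNat * k.toNat ≤ n := by
        zify
        rw [hkz]
        exact h
      have hks : k.toNat ≤ Nat.sqrt n := Nat.le_sqrt.2 hkn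
      have hkle : k ≤ (n : ℤ) := by
        calc k ≤ k * k := le_mul_of_one_le_left (by omega) hk
          _ ≤ (n : ℤ) := h
      rw [ih (k + 1) _ (by omega) (by omega)]
      rw [Finset.sum_eq_sum_Ico_succ_bot (by omega : k.toNat < Nat.sqrt n + 1)]
      have htn : (k + 1).toNat = k.toNat + 1 := by omega
      rw [htn]
      have hdvd : (PySem.Int.mod (n : ℤ) k = 0) ↔ (k.toNat ∣ n) := by
        rw [PySem.Int.mod_eq_zero_iff_dvd]
        conv_lhs => rw [← hkz]
        exact Int.natCast_dvd_natCast
      have hsq : (k * k = (n : ℤ)) ↔ (k.toNat * k.toNat = n) := by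
        rw [← hkz]
        constructor
        · intro hh; exact_mod_cast hh
        · intro hh; exact_mod_cast hh
      rw [show (if PySem.Int.mod (n : ℤ) k = 0 then if k * k = (n : ℤ) then d + 1 else d + 2 else d)
          = (if k.toNat ∣ n then if k.toNat * k.toNat = n then d + 1 else d + 2 else d) from
        if_congr hdvd (if_congr hsq rfl rfl) rfl]
      unfold contribN
      split_ifs with h1 h2
      · push_cast; ring
      · push_cast; ring
      · push_cast; ring
    · rw [if_neg h]
      have hlt : Nat.sqrt n < k.toNat := by
        rw [Nat.sqrt_lt]
        zify
        rw [hkz]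
        exact not_le.mp h
      rw [Finset.Ico_eq_empty (by omega), Finset.sum_empty]
      simp

theorem key (n : ℕ) (hn : 1 ≤ n) :
    ∑ j ∈ Finset.Ico 1 (Nat.sqrt n + 1), contribN n j = (Nat.divisors n).card := by
  have hn0 : n ≠ 0 := by omega
  have hS : (Finset.Ico 1 (Nat.sqrt n + 1)).filter (· ∣ n)
      = (Nat.divisors n).filter (· ≤ Nat.sqrt n) := by
    ext j
    simp only [Finset.mem_filter, Finset.mem_Ico, Nat.mem_divisors]
    constructor
    · rintro ⟨⟨h1, h2⟩, hd⟩; exact ⟨⟨hd, hn0⟩, by omega⟩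
    · rintro ⟨⟨hd, -⟩, hle⟩
      exact ⟨⟨Nat.pos_of_dvd_of_pos hd (by omega), by omega⟩, hd⟩
  have hsum : ∑ j ∈ Finset.Ico 1 (Nat.sqrt n + 1), contribN n j
      = ∑ j ∈ (Nat.divisors n).filter (· ≤ Nat.sqrt n), (if j * j = n then 1 else 2) := by
    rw [← hS, Finset.sum_filter]
    exact Finset.sum_congr rfl (fun j _ => rfl)
  have hsplit : ((Nat.divisors n).filter (fun j => j ≤ Nat.sqrt n)).card
      + ((Nat.divisors n).filter (fun j => ¬ j ≤ Nat.sqrt n)).card = (Nat.divisors n).card :=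
    Finset.card_filter_add_card_filter_not _
  have hSQ : (((Nat.divisors n).filter (· ≤ Nat.sqrt n)).filter (fun j => j * j = n)).card
      + (((Nat.divisors n).filter (· ≤ Nat.sqrt n)).filter (fun j => ¬ j * j = n)).card
      = ((Nat.divisors n).filter (· ≤ Nat.sqrt n)).card :=
    Finset.card_filter_add_card_filter_not _
  have hLQ : ((Nat.divisors n).filter (fun j => ¬ j ≤ Nat.sqrt n)).card
      = (((Nat.divisors n).filter (· ≤ Nat.sqrt n)).filter (fun j => ¬ j * j = n)).card := by
    refine Finset.card_bij' (fun d _ => n / d) (fun e _ => n / e) ?_ ?_ ?_ ?_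
    · intro d hd
      rw [Finset.mem_filter, Nat.mem_divisors] at hd
      obtain ⟨⟨hdvd, -⟩, hds⟩ := hd
      have hds : Nat.sqrt n < d := by omega
      have hd0 : 0 < d := by omega
      have hdivlt : n / d < Nat.sqrt n + 1 := by
        rw [Nat.div_lt_iff_lt_mul hd0]
        calc n < (Nat.sqrt n + 1) * (Nat.sqrt n + 1) := Nat.lt_succ_sqrt n
          _ ≤ (Nat.sqrt n + 1) * d := Nat.mul_le_mul_left _ (by omega)
      have hnd : n / d ∣ n := Nat.div_dvd_of_dvd hdvd
      have hnd0 : 0 < n / d := Nat.div_pos (Nat.le_of_dvd (by omega) hdvd) hd0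
      simp only [Finset.mem_filter, Nat.mem_divisors]
      refine ⟨⟨⟨hnd, hn0⟩, by omega⟩, ?_⟩
      intro hsq
      have h1 : n / (n / d) = n / d := by
        generalize hgen : n / d = m at hsq hnd0 ⊢
        rw [← hsq]
        exact Nat.mul_div_cancel_left _ hnd0
      have hdd : d = n / (n / d) := (Nat.div_div_self hdvd hn0).symm
      omega
    · intro e he
      rw [Finset.mem_filter, Finset.mem_filter, Nat.mem_divisors] at he
      obtain ⟨⟨⟨hdvd, -⟩, hes⟩, hesq⟩ := he
      have he0 : 0 < e := Nat.pos_of_dvd_of_pos hdvd (by omega)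
      have hnd : n / e ∣ n := Nat.div_dvd_of_dvd hdvd
      simp only [Finset.mem_filter, Nat.mem_divisors]
      refine ⟨⟨hnd, hn0⟩, ?_⟩
      intro hle
      have hne : e * (n / e) = n := Nat.mul_div_cancel' hdvd
      have hss : Nat.sqrt n * Nat.sqrt n ≤ n := Nat.sqrt_le n
      have hs0 : 0 < Nat.sqrt n := by
        rcases Nat.eq_zero_or_pos (Nat.sqrt n) with h | h
        · rw [h] at hes; omega
        · exact h
      have h1 : e * (n / e) ≤ e * Nat.sqrt n := Nat.mul_le_mul_left _ hle
      have hes' : e = Nat.sqrt n := by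
        by_contra hne'
        have helt : e < Nat.sqrt n := by omega
        have h2 : e * Nat.sqrt n < Nat.sqrt n * Nat.sqrt n :=
          Nat.mul_lt_mul_of_lt_of_le helt (le_refl _) hs0
        have : n < n := by
          calc n = e * (n / e) := hne.symm
            _ ≤ e * Nat.sqrt n := h1
            _ < Nat.sqrt n * Nat.sqrt n := h2
            _ ≤ n := hss
        omega
      apply hesq
      have h2 : e * Nat.sqrt n ≤ Nat.sqrt n * Nat.sqrt n := Nat.mul_le_mul_right _ hes
      have hnss : n = Nat.sqrt n * Nat.sqrt n :=
        le_antisymm (by calc n = e * (n / e) := hne.symm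
            _ ≤ e * Nat.sqrt n := h1
            _ ≤ Nat.sqrt n * Nat.sqrt n := h2) hss
      rw [hes']
      exact hnss.symm
    · intro d hd
      rw [Finset.mem_filter, Nat.mem_divisors] at hd
      exact Nat.div_div_self hd.1.1 hn0
    · intro e he
      rw [Finset.mem_filter, Finset.mem_filter, Nat.mem_divisors] at he
      exact Nat.div_div_self he.1.1.1 hn0
  have hval : ∑ j ∈ (Nat.divisors n).filter (· ≤ Nat.sqrt n), (if j * j = n then 1 else 2)
      = (((Nat.divisors n).filter (· ≤ Nat.sqrt n)).filter (fun j => j * j = n)).card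
      + 2 * (((Nat.divisors n).filter (· ≤ Nat.sqrt n)).filter (fun j => ¬ j * j = n)).card := by
    rw [← Finset.sum_filter_add_sum_filter_not ((Nat.divisors n).filter (· ≤ Nat.sqrt n))
      (fun j => j * j = n)]
    have h1 : ∑ j ∈ ((Nat.divisors n).filter (· ≤ Nat.sqrt n)).filter (fun j => j * j = n),
        (if j * j = n then 1 else 2)
        = (((Nat.divisors n).filter (· ≤ Nat.sqrt n)).filter (fun j => j * j = n)).card := by
      rw [Finset.sum_congr rfl (fun j hj => ?_), Finset.sum_const, smul_eq_mul, mul_one]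
      rw [Finset.mem_filter] at hj
      rw [if_pos hj.2]
    have h2 : ∑ j ∈ ((Nat.divisors n).filter (· ≤ Nat.sqrt n)).filter (fun j => ¬ j * j = n),
        (if j * j = n then 1 else 2)
        = 2 * (((Nat.divisors n).filter (· ≤ Nat.sqrt n)).filter (fun j => ¬ j * j = n)).card := by
      rw [Finset.sum_congr rfl (fun j hj => ?_), Finset.sum_const, smul_eq_mul, mul_comm]
      rw [Finset.mem_filter] at hj
      rw [if_neg hj.2]
    omega
  omega

theorem counts_eq (c : ℤ) (hc : 1 ≤ c) : sqrtDivCountB c = pyDivCountA c := by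
  unfold sqrtDivCountB
  rw [show c = ((c.toNat : ℕ) : ℤ) by omega]
  rw [sqrtLoop_spec c.toNat (by omega) _ 1 0 (by norm_num) (by omega), zero_add]
  rw [countA_nat c.toNat (by omega)]
  rw [show (1 : ℤ).toNat = 1 from rfl, key c.toNat (by omega)]

theorem build_eq (fuel : Nat) (num c : ℤ) (h : 1 ≤ c) :
    buildA fuel num c = buildB fuel num c := by
  induction fuel generalizing c with
  | zero => rfl
  | succ f ih =>
    rw [buildA, buildB]
    split_ifs with hc
    · rw [counts_eq c h, ih (c + pyDivCountA c) (by have := pyDivCountA_pos c h; omega)]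
    · rfl

-- ===== VERDICT (by name: the statement is the Claim_ definition above) =====
theorem julianachi_spec : Claim_equal_julianachi := by
  intro num _
  unfold Spec_julianachi julianachi julianachi_alt
  exact build_eq num.toNat num 1 (by norm_num)
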